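-- pv_equiv track=rewrite | github.com/AuNooAI/AunooAI | app/routes/trend_convergence_routes.py | prepare_analysis_summary
-- ===== SOURCE A (Python) =====
-- from typing import List, Dict, Optional, Callable, Any
-- from collections import Counter, defaultdict
--
-- def prepare_analysis_summary(articles: List, topic: str) -> str:
--     """Prepare a structured summary of article data for the AI prompt"""
--
--     # Analyze patterns in the data
--     sentiments = []
--     categories = []
--     drivers = []
--     signals = []
--     time_impacts = []
--
--     for article in articles:  # Process all articles
--         if article['sentiment']:
--             sentiments.append(article['sentiment'])
--         if article['category']:
--             categories.append(article['category'])
--         if article['driver_type']: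
--             drivers.append(article['driver_type'])
--         if article['future_signal']:
--             signals.append(article['future_signal'])
--         if article['time_to_impact']:
--             time_impacts.append(article['time_to_impact'])
--
--     # Count frequencies
--     sentiment_counts = Counter(sentiments)
--     category_counts = Counter(categories)
--     driver_counts = Counter(drivers)
--     signal_counts = Counter(signals)
--     time_impact_counts = Counter(time_impacts)
--
--     # Build analysis summary
--     summary = f"""**Topic Analysis for: {topic}**
--
-- **Data Overview:**
-- - Total articles analyzed: {len(articles)}
-- - Date range: {str(articles[-1]['publication_date'])[:10] if articles and articles[-1]['publication_date'] else 'Unknown'} to {str(articles[0]['publication_date'])[:10] if articles and articles[0]['publication_date'] else 'Unknown'}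
--
-- **Sentiment Distribution:**
-- {chr(10).join([f"- {sent}: {count} articles" for sent, count in sentiment_counts.most_common(5)])}
--
-- **Category Distribution:**
-- {chr(10).join([f"- {cat}: {count} articles" for cat, count in category_counts.most_common(5)])}
--
-- **Most Common Drivers:**
-- {chr(10).join([f"- {driver}: {count} mentions" for driver, count in driver_counts.most_common(5)])}
--
-- **Future Signals Identified:**
-- {chr(10).join([f"- {signal}: {count} mentions" for signal, count in signal_counts.most_common(5)])}
--
-- **Time to Impact Distribution:**
-- {chr(10).join([f"- {impact}: {count} articles" for impact, count in time_impact_counts.most_common(5)])}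
-- """
--
--     return summary
-- ===== SOURCE B (Python) =====
-- FIELD_SPECS = [
--     ("Sentiment Distribution", "sentiment", "articles"),
--     ("Category Distribution", "category", "articles"),
--     ("Most Common Drivers", "driver_type", "mentions"),
--     ("Future Signals Identified", "future_signal", "mentions"),
--     ("Time to Impact Distribution", "time_to_impact", "articles"),
-- ]
--
--
-- def prepare_analysis_summary(articles, topic):
--     """One pass filling per-field count dicts; top-5 by repeated max-extraction
--     (no intermediate value lists, no Counter, no sort)."""
--     counts = {key: {} for _, key, _ in FIELD_SPECS}
--     for a in articles:
--         for _, key, _ in FIELD_SPECS: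
--             v = a[key]
--             if v:
--                 counts[key][v] = counts[key].get(v, 0) + 1
--
--     def date_at(i):
--         if articles and articles[i]['publication_date']:
--             return str(articles[i]['publication_date'])[:10]
--         return 'Unknown'
--
--     def top5(d):
--         pairs, out = list(d.items()), []
--         while pairs and len(out) < 5:
--             best = max(pairs, key=lambda p: p[1])
--             out.append(best)
--             pairs.remove(best)
--         return out
--
--     parts = [
--         f"**Topic Analysis for: {topic}**\n\n"
--         "**Data Overview:**\n"
--         f"- Total articles analyzed: {len(articles)}\n"
--         f"- Date range: {date_at(-1)} to {date_at(0)}\n"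
--     ]
--     for header, key, unit in FIELD_SPECS:
--         lines = "\n".join(f"- {k}: {c} {unit}" for k, c in top5(counts[key]))
--         parts.append(f"\n**{header}:**\n{lines}\n")
--     return "".join(parts)
-- ===== Notes on version B (the rewrite author's own statement) =====
-- stated objective: alternative
-- what changed: A accumulates five parallel value lists, Counters them and formats most_common(5) inline; B makes one pass over the articles incrementing a per-field table of count dicts (no intermediate lists, no Counter) and extracts each top-5 by repeated first-max selection and removal instead of a sort, assembling the report from the field-spec table.
import Mathlib
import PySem

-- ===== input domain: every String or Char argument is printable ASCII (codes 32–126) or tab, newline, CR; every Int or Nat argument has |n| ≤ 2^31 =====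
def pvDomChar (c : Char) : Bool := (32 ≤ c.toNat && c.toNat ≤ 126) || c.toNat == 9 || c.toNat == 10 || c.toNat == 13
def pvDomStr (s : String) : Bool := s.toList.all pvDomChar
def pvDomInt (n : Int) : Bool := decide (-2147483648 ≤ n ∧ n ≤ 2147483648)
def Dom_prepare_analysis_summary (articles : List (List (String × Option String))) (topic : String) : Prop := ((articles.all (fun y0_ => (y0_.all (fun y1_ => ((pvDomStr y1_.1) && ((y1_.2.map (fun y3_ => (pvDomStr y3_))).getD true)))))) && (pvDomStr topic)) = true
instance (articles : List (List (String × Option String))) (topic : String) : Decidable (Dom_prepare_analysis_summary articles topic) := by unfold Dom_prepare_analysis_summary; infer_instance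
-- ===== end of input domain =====

-- B replaces A's five-list accumulation + Counter + most_common(5) by one pass over the articles
-- incrementing a per-field table of count dicts, and extracts each top-5 by repeated
-- first-max selection instead of a sort (alternative decomposition; same observable result).

-- article[k] followed by Python truthiness: `some v` iff the key maps to a non-None, non-empty string
def pvFieldVal (a : List (String × Option String)) (k : String) : Option String :=
  match PySem.Dict.get? (PySem.Dict.mk a) k with
  | some (some s) => if s = "" then none else some s
  | _ => none

-- str(v)[:10] if present and truthy else 'Unknown'  (shared: both Pythons contain this expression verbatim)
def pvDateOf (a? : Option (List (String × Option String))) : String :=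
  match a? with
  | some a =>
    match pvFieldVal a "publication_date" with
    | some v => PySem.Str.slice v none (some 10)
    | none => "Unknown"
  | none => "Unknown"

-- ===== PORT A =====
-- Counter.most_common(5): items in first-insertion order, stably sorted by count descending, first 5
def pvMostCommon5 (c : PySem.Dict String Int) : List (String × Int) :=
  (PySem.List.sorted c.items (fun p => p.2) true).take 5

def prepare_analysis_summary (articles : List (List (String × Option String))) (topic : String) : String :=
  let st := articles.foldl
    (fun (st : List String × List String × List String × List String × List String) a =>
      let s1 := match pvFieldVal a "sentiment" with | some v => st.1 ++ [v] | none => st.1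
      let s2 := match pvFieldVal a "category" with | some v => st.2.1 ++ [v] | none => st.2.1
      let s3 := match pvFieldVal a "driver_type" with | some v => st.2.2.1 ++ [v] | none => st.2.2.1
      let s4 := match pvFieldVal a "future_signal" with | some v => st.2.2.2.1 ++ [v] | none => st.2.2.2.1
      let s5 := match pvFieldVal a "time_to_impact" with | some v => st.2.2.2.2 ++ [v] | none => st.2.2.2.2
      (s1, s2, s3, s4, s5)) ([], [], [], [], [])
  "**Topic Analysis for: " ++ topic ++ "**\n\n**Data Overview:**\n- Total articles analyzed: "
    ++ PySem.Int.toStr (articles.length : Int)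
    ++ "\n- Date range: " ++ pvDateOf (PySem.List.pyGet? articles (-1))
    ++ " to " ++ pvDateOf (PySem.List.pyGet? articles 0)
    ++ "\n\n**Sentiment Distribution:**\n"
    ++ PySem.Str.join "\n" ((pvMostCommon5 (PySem.Dict.counter st.1)).map
        (fun p => "- " ++ p.1 ++ ": " ++ PySem.Int.toStr p.2 ++ " articles"))
    ++ "\n\n**Category Distribution:**\n"
    ++ PySem.Str.join "\n" ((pvMostCommon5 (PySem.Dict.counter st.2.1)).map
        (fun p => "- " ++ p.1 ++ ": " ++ PySem.Int.toStr p.2 ++ " articles"))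
    ++ "\n\n**Most Common Drivers:**\n"
    ++ PySem.Str.join "\n" ((pvMostCommon5 (PySem.Dict.counter st.2.2.1)).map
        (fun p => "- " ++ p.1 ++ ": " ++ PySem.Int.toStr p.2 ++ " mentions"))
    ++ "\n\n**Future Signals Identified:**\n"
    ++ PySem.Str.join "\n" ((pvMostCommon5 (PySem.Dict.counter st.2.2.2.1)).map
        (fun p => "- " ++ p.1 ++ ": " ++ PySem.Int.toStr p.2 ++ " mentions"))
    ++ "\n\n**Time to Impact Distribution:**\n"
    ++ PySem.Str.join "\n" ((pvMostCommon5 (PySem.Dict.counter st.2.2.2.2)).map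
        (fun p => "- " ++ p.1 ++ ": " ++ PySem.Int.toStr p.2 ++ " articles"))
    ++ "\n"

-- ===== PORT B =====
-- FIELD_SPECS: (section header, article key, unit word)
def pvSpecs : List (String × String × String) :=
  [("Sentiment Distribution", "sentiment", "articles"),
   ("Category Distribution", "category", "articles"),
   ("Most Common Drivers", "driver_type", "mentions"),
   ("Future Signals Identified", "future_signal", "mentions"),
   ("Time to Impact Distribution", "time_to_impact", "articles")]

-- counts = {key: {} for _, key, _ in FIELD_SPECS}
def pvInit : PySem.Dict String (PySem.Dict String Int) :=
  pvSpecs.foldl (fun c sp => c.insert sp.2.1 PySem.Dict.empty) PySem.Dict.empty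

-- inner loop of the single pass: for each spec, v = a[key]; if v: counts[key][v] = counts[key].get(v,0)+1
-- (counts[key] always exists — initialised above — so the `empty` default of modify is never consulted)
def pvCountStep (c : PySem.Dict String (PySem.Dict String Int))
    (a : List (String × Option String)) : PySem.Dict String (PySem.Dict String Int) :=
  pvSpecs.foldl (fun c sp =>
    match pvFieldVal a sp.2.1 with
    | some v => c.modify sp.2.1 PySem.Dict.empty (fun d => d.modify v 0 (· + 1))
    | none => c) c

-- top5: while pairs and len(out) < 5: best = max(pairs, key=count); out.append(best); pairs.remove(best)
-- (pairs.remove(best) = erase of the first pair equal to best — exact, ValueError impossible since best ∈ pairs)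
def pvTop (fuel : Nat) (pairs : List (String × Int)) : List (String × Int) :=
  match fuel, pairs with
  | 0, _ => []
  | _, [] => []
  | n + 1, p :: rest =>
    match PySem.List.max? (p :: rest) (fun q => q.2) with
    | some best => best :: pvTop n ((p :: rest).erase best)
    | none => []

def prepare_analysis_summary_alt (articles : List (List (String × Option String))) (topic : String) : String :=
  let counts := articles.foldl pvCountStep pvInit
  let head := "**Topic Analysis for: " ++ topic ++ "**\n\n**Data Overview:**\n- Total articles analyzed: "
    ++ PySem.Int.toStr (articles.length : Int)
    ++ "\n- Date range: " ++ pvDateOf (PySem.List.pyGet? articles (-1))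
    ++ " to " ++ pvDateOf (PySem.List.pyGet? articles 0) ++ "\n"
  head ++ PySem.Str.join "" (pvSpecs.map (fun sp =>
    "\n**" ++ sp.1 ++ ":**\n"
      ++ PySem.Str.join "\n" ((pvTop 5 (counts.getD sp.2.1 PySem.Dict.empty).items).map
          (fun p => "- " ++ p.1 ++ ": " ++ PySem.Int.toStr p.2 ++ " " ++ sp.2.2))
      ++ "\n"))

-- ===== PRECONDITION & SPEC =====
def pvHasKey (a : List (String × Option String)) (k : String) : Prop := k ∈ a.map Prod.fst

-- Pre_ excludes exactly the inputs on which Python A raises KeyError: an article missing one of the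
-- five analysed keys, or (when articles is nonempty) the first/last article missing 'publication_date'.
def Pre_prepare_analysis_summary (articles : List (List (String × Option String))) (topic : String) : Prop :=
  (∀ a ∈ articles, pvHasKey a "sentiment" ∧ pvHasKey a "category" ∧ pvHasKey a "driver_type"
      ∧ pvHasKey a "future_signal" ∧ pvHasKey a "time_to_impact")
  ∧ (∀ a ∈ articles.head?.toList, pvHasKey a "publication_date")
  ∧ (∀ a ∈ articles.getLast?.toList, pvHasKey a "publication_date")

instance (articles : List (List (String × Option String))) (topic : String) : Decidable (Pre_prepare_analysis_summary articles topic) := by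
  unfold Pre_prepare_analysis_summary pvHasKey; infer_instance

def pvWitness_prepare_analysis_summary : (List (List (String × Option String))) × String :=
  ([[("sentiment", some "positive"), ("category", some "tech"), ("driver_type", none),
     ("future_signal", some ""), ("time_to_impact", some "1-2 years"),
     ("publication_date", some "2024-01-02T10:00:00")]], "AI")

def Spec_prepare_analysis_summary (articles : List (List (String × Option String))) (topic : String) (out : String) : Prop := out = prepare_analysis_summary_alt articles topic
instance (articles : List (List (String × Option String))) (topic : String) (out : String) : Decidable (Spec_prepare_analysis_summary articles topic out) := by unfold Spec_prepare_analysis_summary; infer_instance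

-- ===== CLAIM (what is proved, stated in full; the proofs are below) =====
def Claim_equal_prepare_analysis_summary : Prop := ∀ (articles : List (List (String × Option String))) (topic : String), Dom_prepare_analysis_summary articles topic → Pre_prepare_analysis_summary articles topic → Spec_prepare_analysis_summary articles topic (prepare_analysis_summary articles topic)

-- ===== LEMMAS AND PROOFS =====

-- A's accumulation pass, split into the five per-field filtered streams
theorem pv_fold5 (l : List (List (String × Option String)))
    (a1 a2 a3 a4 a5 : List String) :
    l.foldl (fun (st : List String × List String × List String × List String × List String) a =>
      let s1 := match pvFieldVal a "sentiment" with | some v => st.1 ++ [v] | none => st.1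
      let s2 := match pvFieldVal a "category" with | some v => st.2.1 ++ [v] | none => st.2.1
      let s3 := match pvFieldVal a "driver_type" with | some v => st.2.2.1 ++ [v] | none => st.2.2.1
      let s4 := match pvFieldVal a "future_signal" with | some v => st.2.2.2.1 ++ [v] | none => st.2.2.2.1
      let s5 := match pvFieldVal a "time_to_impact" with | some v => st.2.2.2.2 ++ [v] | none => st.2.2.2.2
      (s1, s2, s3, s4, s5)) (a1, a2, a3, a4, a5)
    = (a1 ++ l.filterMap (fun a => pvFieldVal a "sentiment"),
       a2 ++ l.filterMap (fun a => pvFieldVal a "category"),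
       a3 ++ l.filterMap (fun a => pvFieldVal a "driver_type"),
       a4 ++ l.filterMap (fun a => pvFieldVal a "future_signal"),
       a5 ++ l.filterMap (fun a => pvFieldVal a "time_to_impact")) := by
  induction l generalizing a1 a2 a3 a4 a5 with
  | nil => simp
  | cons a l ih =>
    simp only [List.foldl_cons, ih, List.filterMap_cons]
    cases pvFieldVal a "sentiment" <;> cases pvFieldVal a "category" <;>
      cases pvFieldVal a "driver_type" <;> cases pvFieldVal a "future_signal" <;>
      cases pvFieldVal a "time_to_impact" <;> simp

-- one article of B's nested pass, projected to one of the five fields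
theorem pv_step (a : List (String × Option String))
    (c : PySem.Dict String (PySem.Dict String Int)) (k : String)
    (hk : k = "sentiment" ∨ k = "category" ∨ k = "driver_type" ∨ k = "future_signal" ∨ k = "time_to_impact") :
    (pvCountStep c a).getD k PySem.Dict.empty
      = match pvFieldVal a k with
        | some v => (c.getD k PySem.Dict.empty).modify v 0 (· + 1)
        | none => c.getD k PySem.Dict.empty := by
  simp only [pvCountStep, pvSpecs, List.foldl_cons, List.foldl_nil]
  rcases hk with rfl | rfl | rfl | rfl | rfl <;>
    cases pvFieldVal a "sentiment" <;> cases pvFieldVal a "category" <;>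
      cases pvFieldVal a "driver_type" <;> cases pvFieldVal a "future_signal" <;>
      cases pvFieldVal a "time_to_impact" <;>
    simp [PySem.Dict.getD_modify_self, PySem.Dict.getD_modify_of_ne]

-- B's nested single pass, projected to one of the five fields
theorem pv_nested (l : List (List (String × Option String)))
    (c : PySem.Dict String (PySem.Dict String Int)) (k : String)
    (hk : k = "sentiment" ∨ k = "category" ∨ k = "driver_type" ∨ k = "future_signal" ∨ k = "time_to_impact") :
    (l.foldl pvCountStep c).getD k PySem.Dict.empty
      = (l.filterMap (fun a => pvFieldVal a k)).foldl
          (fun d v => d.modify v 0 (· + 1)) (c.getD k PySem.Dict.empty) := by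
  induction l generalizing c with
  | nil => simp
  | cons a l ih =>
    rw [List.foldl_cons, List.filterMap_cons, ih (pvCountStep c a), pv_step a c k hk]
    cases pvFieldVal a k <;> simp

-- the per-field fold from the empty dict is Counter of the filtered stream
theorem pv_countfold (l : List (List (String × Option String))) (k : String) :
    (l.filterMap (fun a => pvFieldVal a k)).foldl (fun d v => d.modify v 0 (· + 1)) PySem.Dict.empty
      = PySem.Dict.counter (l.filterMap (fun a => pvFieldVal a k)) := by
  rw [PySem.Dict.counter_eq_foldl]

theorem pv_init_getD (k : String)
    (hk : k = "sentiment" ∨ k = "category" ∨ k = "driver_type" ∨ k = "future_signal" ∨ k = "time_to_impact") :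
    pvInit.getD k PySem.Dict.empty = PySem.Dict.empty := by
  rcases hk with rfl | rfl | rfl | rfl | rfl <;> decide

-- selection sort (proof-only): repeatedly extract the first maximal pair
def pvSelSort (l : List (String × Int)) : List (String × Int) :=
  match h : PySem.List.max? l (fun q => q.2) with
  | none => []
  | some m => m :: pvSelSort (l.erase m)
termination_by l.length
decreasing_by
  have hm := PySem.List.max?_mem h
  have h1 := List.length_erase_of_mem hm
  have h2 : l ≠ [] := by rintro rfl; simp at hm
  have h3 : 0 < l.length := List.length_pos_iff.mpr h2
  omega

theorem pv_selSort_nil : pvSelSort [] = [] := by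
  rw [pvSelSort.eq_def]; split <;> simp_all [PySem.List.max?]

theorem pv_selSort_cons (l : List (String × Int)) (m : String × Int)
    (hm : PySem.List.max? l (fun q => q.2) = some m) :
    pvSelSort l = m :: pvSelSort (l.erase m) := by
  rw [pvSelSort.eq_def]; split <;> simp_all

theorem pv_top_take (n : Nat) (l : List (String × Int)) :
    pvTop n l = (pvSelSort l).take n := by
  induction n generalizing l with
  | zero => cases l <;> simp [pvTop]
  | succ n ih =>
    cases l with
    | nil => simp [pvTop, pv_selSort_nil]
    | cons p rest =>
      cases hm : PySem.List.max? (p :: rest) (fun q => q.2) with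
      | none => simp [PySem.List.max?_eq_none_iff] at hm
      | some m =>
        rw [pv_selSort_cons _ _ hm]
        simp only [pvTop, hm, List.take_succ_cons, ih]

theorem pv_max?_append (l : List (String × Int)) (x : String × Int) :
    PySem.List.max? (l ++ [x]) (fun q => q.2)
      = match PySem.List.max? l (fun q => q.2) with
        | none => some x
        | some m => if m.2 < x.2 then some x else some m := by
  cases h : PySem.List.max? l (fun q => q.2) with
  | none =>
    simp only [PySem.List.max?] at h ⊢
    rw [List.foldl_append, h]
    rfl
  | some m =>
    simp only [PySem.List.max?] at h ⊢
    rw [List.foldl_append, h]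
    rfl

theorem pv_selSort_append (x : String × Int) (l : List (String × Int)) :
    pvSelSort (l ++ [x])
      = PySem.List.insertBy (fun a b => decide (b.2 < a.2)) x (pvSelSort l) := by
  induction hn : l.length using Nat.strong_induction_on generalizing l with
  | _ n ih =>
  subst hn
  cases hm : PySem.List.max? l (fun q => q.2) with
  | none =>
    have hl : l = [] := (PySem.List.max?_eq_none_iff l _).mp hm
    subst hl
    have h1 : PySem.List.max? ([] ++ [x]) (fun q => q.2) = some x := by
      simp [PySem.List.max?]
    rw [pv_selSort_cons _ _ h1, pv_selSort_nil]
    simp [PySem.List.insertBy, pv_selSort_nil]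
  | some m =>
    have hmem := PySem.List.max?_mem hm
    by_cases hx : m.2 < x.2
    · have hmax : PySem.List.max? (l ++ [x]) (fun q => q.2) = some x := by
        rw [pv_max?_append, hm]; simp [hx]
      have hnotin : x ∉ l := by
        intro hxl
        have hle := PySem.List.max?_isMax hm x hxl
        simp only at hle; omega
      have herase : (l ++ [x]).erase x = l := by
        rw [List.erase_append_right _ hnotin]; simp
      rw [pv_selSort_cons _ _ hmax, herase, pv_selSort_cons _ _ hm]
      simp [PySem.List.insertBy, hx]
    · have hmax : PySem.List.max? (l ++ [x]) (fun q => q.2) = some m := by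
        rw [pv_max?_append, hm]; simp [hx]
      have herase : (l ++ [x]).erase m = l.erase m ++ [x] := List.erase_append_left _ hmem
      have hlen : (l.erase m).length < l.length := by
        have h1 := List.length_erase_of_mem hmem
        have h3 : 0 < l.length := List.length_pos_iff.mpr (by rintro rfl; simp at hmem)
        omega
      rw [pv_selSort_cons _ _ hmax, herase, ih _ hlen (l.erase m) rfl,
          pv_selSort_cons _ _ hm]
      simp [PySem.List.insertBy, hx]

theorem pv_selSort_eq_sorted (l : List (String × Int)) :
    PySem.List.sorted l (fun q => q.2) true = pvSelSort l := by
  induction l using List.reverseRecOn with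
  | nil => simp [PySem.List.sorted, pv_selSort_nil]
  | append_singleton l x ih =>
    rw [PySem.List.sorted_rev_eq_foldl_insertBy, List.foldl_append, List.foldl_cons, List.foldl_nil,
        ← PySem.List.sorted_rev_eq_foldl_insertBy, ih, pv_selSort_append]

theorem pv_top5_eq (c : PySem.Dict String Int) :
    pvTop 5 c.items = pvMostCommon5 c := by
  rw [pv_top_take, pvMostCommon5, pv_selSort_eq_sorted]

theorem pv_sp_articles : (" " : String) ++ "articles" = " articles" := rfl
theorem pv_sp_mentions : (" " : String) ++ "mentions" = " mentions" := rfl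

-- ===== VERDICT (by name: the statement is the Claim_ definition above) =====
set_option maxRecDepth 8192 in
theorem prepare_analysis_summary_spec : Claim_equal_prepare_analysis_summary := by
  intro articles topic _ _
  unfold Spec_prepare_analysis_summary
  unfold prepare_analysis_summary prepare_analysis_summary_alt
  simp only [pv_fold5, List.nil_append, pvSpecs, List.map_cons, List.map_nil,
    pv_nested articles pvInit "sentiment" (Or.inl rfl),
    pv_nested articles pvInit "category" (Or.inr (Or.inl rfl)),
    pv_nested articles pvInit "driver_type" (Or.inr (Or.inr (Or.inl rfl))),
    pv_nested articles pvInit "future_signal" (Or.inr (Or.inr (Or.inr (Or.inl rfl)))),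
    pv_nested articles pvInit "time_to_impact" (Or.inr (Or.inr (Or.inr (Or.inr rfl)))),
    pv_init_getD "sentiment" (Or.inl rfl),
    pv_init_getD "category" (Or.inr (Or.inl rfl)),
    pv_init_getD "driver_type" (Or.inr (Or.inr (Or.inl rfl))),
    pv_init_getD "future_signal" (Or.inr (Or.inr (Or.inr (Or.inl rfl)))),
    pv_init_getD "time_to_impact" (Or.inr (Or.inr (Or.inr (Or.inr rfl)))),
    pv_countfold, pv_top5_eq]
  refine String.toList_inj.mp ?_
  simp [PySem.Str.join, PySem.Chars.join, String.toList_append, List.intercalate,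
        List.intersperse, String.append_assoc, pv_sp_articles, pv_sp_mentions]
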